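-- pv_equiv track=rewrite | github.com/JoshCLWren/comic-identity-engine | comic_identity_engine/jobs/tasks.py | _group_clz_rows_by_series
-- ===== SOURCE A (Python) =====
-- def _group_clz_rows_by_series(
--     rows: list[tuple[int, dict[str, str], str]],
-- ) -> dict[str, list[tuple[int, dict[str, str], str]]]:
--     """Group CLZ CSV rows by series (title + year).
--
--     Args:
--         rows: List of (row_index, row_data, row_key) tuples
--
--     Returns:
--         Dictionary mapping series_key to list of rows
--         series_key format: "{series_title}|{year}"
--     """
--     from collections import defaultdict
--
--     series_groups: defaultdict[str, list[tuple[int, dict[str, str], str]]] = (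
--         defaultdict(list)
--     )
--
--     for row_index, row, row_key in rows:
--         series_title = (row.get("Series") or "").strip()
--         year = row.get("Year") or row.get("Cover Year") or ""
--         year = str(year).strip() if year else ""
--
--         if not series_title:
--             continue
--
--         series_key = f"{series_title}|{year}"
--         series_groups[series_key].append((row_index, row, row_key))
--
--     return dict(series_groups)
-- ===== SOURCE B (Python) =====
-- def _group_clz_rows_by_series(
--     rows: list[tuple[int, dict[str, str], str]],
-- ) -> dict[str, list[tuple[int, dict[str, str], str]]]:
--     """Group CLZ CSV rows by series (title + year) by recursive group
--     extraction: take the first remaining key, pull out its whole group,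
--     recurse on the rest.  No dict accumulator is used."""
--
--     def key_of(row: dict[str, str]):
--         title = (row.get("Series") or "").strip()
--         if not title:
--             return None
--         year = (row.get("Year") or row.get("Cover Year") or "").strip()
--         return title + "|" + year
--
--     def go(pending):
--         if not pending:
--             return []
--         (k, first), rest = pending[0], pending[1:]
--         group = [first] + [r for k2, r in rest if k2 == k]
--         others = [p for p in rest if p[0] != k]
--         return [(k, group)] + go(others)
--
--     keyed = [(k, r) for r in rows if (k := key_of(r[1])) is not None]
--     return dict(go(keyed))
-- ===== Notes on version B (the rewrite author's own statement) =====
-- stated objective: alternative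
-- what changed: Replaces the incremental defaultdict(list) accumulation with a recursive group-extraction: rows are keyed once, then the function repeatedly takes the first remaining key, pulls out that key's entire group and recurses on the remaining pairs, using no dictionary at all.
import Mathlib
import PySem

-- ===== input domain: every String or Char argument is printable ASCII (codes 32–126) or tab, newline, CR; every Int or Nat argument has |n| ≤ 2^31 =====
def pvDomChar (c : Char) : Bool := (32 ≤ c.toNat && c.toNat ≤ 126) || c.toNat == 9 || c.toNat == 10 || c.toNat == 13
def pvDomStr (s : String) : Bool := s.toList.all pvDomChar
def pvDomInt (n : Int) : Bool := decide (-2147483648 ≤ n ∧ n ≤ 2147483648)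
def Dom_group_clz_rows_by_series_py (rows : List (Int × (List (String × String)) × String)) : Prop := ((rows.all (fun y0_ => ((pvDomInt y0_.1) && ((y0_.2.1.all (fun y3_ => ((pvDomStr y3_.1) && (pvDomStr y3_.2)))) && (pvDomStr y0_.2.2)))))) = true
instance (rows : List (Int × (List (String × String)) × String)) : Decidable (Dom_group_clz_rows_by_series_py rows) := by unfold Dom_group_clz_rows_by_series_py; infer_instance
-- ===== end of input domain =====

-- B replaces A's incremental defaultdict accumulation by recursive group extraction over the
-- once-keyed rows: take the first remaining key, pull out its whole group, recurse on the rest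
-- (objective: alternative decomposition, same result including dict insertion order).

-- ===== PORT A =====
-- literal transliteration of A: one fold over rows, a defaultdict(list) accumulated by
-- append-in-place (PySem.Dict.modify), returned as its items list
def group_clz_rows_by_series_py (rows : List (Int × (List (String × String)) × String)) : List (String × List (Int × (List (String × String)) × String)) :=
  (rows.foldl (fun d r =>
      let row := PySem.Dict.mk r.2.1
      let series_title := PySem.Str.strip (row.getD "Series" "")
      let y0 := row.getD "Year" ""
      let y1 := if y0 == "" then row.getD "Cover Year" "" else y0
      let year := if y1 == "" then "" else PySem.Str.strip y1
      if series_title == "" then d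
      else d.modify (series_title ++ "|" ++ year) [] (fun x => x ++ [r]))
    PySem.Dict.empty).items

-- ===== PORT B =====
-- transliteration of B's key_of helper
def pvKeyOf (row : List (String × String)) : Option String :=
  let d := PySem.Dict.mk row
  let title := PySem.Str.strip (d.getD "Series" "")
  if title == "" then none
  else
    let y0 := d.getD "Year" ""
    let year := PySem.Str.strip (if y0 == "" then d.getD "Cover Year" "" else y0)
    some (title ++ "|" ++ year)

-- transliteration of B's go helper: extract the first key's whole group, recurse on the rest
def pvGo {α : Type} (pending : List (String × α)) : List (String × List α) :=
  match pending with
  | [] => []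
  | (k, first) :: rest =>
    (k, first :: (rest.filter (fun p => p.1 == k)).map (·.2)) ::
      pvGo (rest.filter (fun p => p.1 != k))
termination_by pending.length
decreasing_by simp only [List.length_unattach]; exact Nat.lt_succ_of_le ((List.length_filter_le _ _).trans (Nat.le_of_eq List.length_attach))

def group_clz_rows_by_series_py_alt (rows : List (Int × (List (String × String)) × String)) : List (String × List (Int × (List (String × String)) × String)) :=
  pvGo (rows.filterMap (fun r => (pvKeyOf r.2.1).map (fun k => (k, r))))

-- ===== PRECONDITION & SPEC =====
-- explicit DecidableEq terms (instance search alone exceeds its answer-size limit on this nested type)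
def pvDecEqRow : DecidableEq (Int × (List (String × String)) × String) := by infer_instance
def pvDecEqOut : DecidableEq (List (String × List (Int × (List (String × String)) × String))) :=
  @instDecidableEqList _ (@instDecidableEqProd _ _ instDecidableEqString (@instDecidableEqList _ pvDecEqRow))
def Spec_group_clz_rows_by_series_py (rows : List (Int × (List (String × String)) × String)) (out : List (String × List (Int × (List (String × String)) × String))) : Prop := out = group_clz_rows_by_series_py_alt rows
instance (rows : List (Int × (List (String × String)) × String)) (out : List (String × List (Int × (List (String × String)) × String))) : Decidable (Spec_group_clz_rows_by_series_py rows out) := by unfold Spec_group_clz_rows_by_series_py; exact pvDecEqOut out _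

-- ===== CLAIM (what is proved, stated in full; the proofs are below) =====
def Claim_equal_group_clz_rows_by_series_py : Prop := ∀ (rows : List (Int × (List (String × String)) × String)), Dom_group_clz_rows_by_series_py rows → Spec_group_clz_rows_by_series_py rows (group_clz_rows_by_series_py rows)

-- ===== LEMMAS AND PROOFS =====

-- A's guarded fold over rows is the plain group-by fold over B's keyed list
theorem foldA_eq_foldl_keyed (rows : List (Int × (List (String × String)) × String))
    (d : PySem.Dict String (List (Int × (List (String × String)) × String))) :
    rows.foldl (fun d r =>
      let row := PySem.Dict.mk r.2.1
      let series_title := PySem.Str.strip (row.getD "Series" "")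
      let y0 := row.getD "Year" ""
      let y1 := if y0 == "" then row.getD "Cover Year" "" else y0
      let year := if y1 == "" then "" else PySem.Str.strip y1
      if series_title == "" then d
      else d.modify (series_title ++ "|" ++ year) [] (fun x => x ++ [r])) d
    = (rows.filterMap (fun r => (pvKeyOf r.2.1).map (fun k => (k, r)))).foldl
        (fun d p => d.modify p.1 [] (fun x => x ++ [p.2])) d := by
  rw [List.foldl_filterMap]
  apply PySem.List.foldl_congr_mem
  intro d' r _
  by_cases h : PySem.Str.strip ((PySem.Dict.mk r.2.1).getD "Series" "") = ""
  · simp [pvKeyOf, h]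
  · by_cases hy : (if (PySem.Dict.mk r.2.1).getD "Year" "" == "" then (PySem.Dict.mk r.2.1).getD "Cover Year" "" else (PySem.Dict.mk r.2.1).getD "Year" "") = ""
    · simp only [beq_iff_eq] at hy
      simp [pvKeyOf, h, hy, show PySem.Str.strip "" = "" from by decide]
    · simp only [beq_iff_eq] at hy
      simp [pvKeyOf, h, hy]

-- dedup pulls its head out front: first-occurrence dedup of (x :: xs)
theorem foldl_add_filter_ne {α : Type} [DecidableEq α] (xs : List α) (s : List α) (x : α)
    (hx : x ∈ s) :
    xs.foldl PySem.Set.add s = (xs.filter (fun y => y ≠ x)).foldl PySem.Set.add s := by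
  induction xs generalizing s with
  | nil => rfl
  | cons a xs ih =>
    rw [List.filter_cons]
    by_cases h : a = x
    · subst h
      simp only [ne_eq, not_true_eq_false, decide_false, Bool.false_eq_true, if_false]
      rw [List.foldl_cons]
      have hadd : PySem.Set.add s a = s := by simp [PySem.Set.add, PySem.Set.contains, hx]
      rw [hadd]; exact ih s hx
    · have hd : decide (a ≠ x) = true := by simp [h]
      simp only [hd, if_true]
      rw [List.foldl_cons, List.foldl_cons]
      exact ih _ (by simp only [PySem.Set.add]; split <;> simp [hx])

theorem foldl_add_cons_of_not_mem {α : Type} [DecidableEq α] (ys : List α) (s : List α) (x : α)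
    (hx : x ∉ ys) :
    ys.foldl PySem.Set.add (x :: s) = x :: ys.foldl PySem.Set.add s := by
  induction ys generalizing s with
  | nil => rfl
  | cons a ys ih =>
    have ha : a ≠ x := by rintro rfl; exact hx List.mem_cons_self
    have hstep : PySem.Set.add (x :: s) a = x :: PySem.Set.add s a := by
      have hc : (x :: s).contains a = s.contains a := by
        simp [ha]
      simp only [PySem.Set.add, PySem.Set.contains, hc]
      split <;> simp
    rw [List.foldl_cons, List.foldl_cons, hstep, ih _ (fun h => hx (List.mem_cons_of_mem _ h))]

theorem dedup_cons_filter {α : Type} [DecidableEq α] (x : α) (xs : List α) :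
    PySem.List.dedup (x :: xs) = x :: PySem.List.dedup (xs.filter (fun y => y ≠ x)) := by
  have h1 : PySem.List.dedup (x :: xs) = xs.foldl PySem.Set.add [x] := rfl
  have h2 : PySem.List.dedup (xs.filter (fun y => y ≠ x)) = (xs.filter (fun y => y ≠ x)).foldl PySem.Set.add [] := rfl
  rw [h1, h2, foldl_add_filter_ne xs [x] x (by simp)]
  exact foldl_add_cons_of_not_mem _ [] x (by simp)

-- B's recursive extraction computes the dedup-keys group-by table
theorem pvGo_eq_dedup_map {α : Type} (ps : List (String × α)) :
    pvGo ps = (PySem.List.dedup (ps.map Prod.fst)).map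
      (fun k => (k, (ps.filter (fun p => p.1 == k)).map Prod.snd)) := by
  generalize hn : ps.length = n
  induction n using Nat.strong_induction_on generalizing ps with
  | _ n ih =>
    match ps with
    | [] => rw [pvGo]; rfl
    | (k, first) :: rest =>
      rw [pvGo]
      rw [ih (rest.filter (fun p => p.1 != k)).length
            (by rw [← hn]; exact Nat.lt_succ_of_le (List.length_filter_le _ _)) _ rfl]
      rw [List.map_cons, dedup_cons_filter, List.map_cons]
      congr 1
      · simp
      · have hmf : (rest.map Prod.fst).filter (fun y => y ≠ k) = (rest.filter (fun p => p.1 != k)).map Prod.fst := by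
          rw [List.filter_map]
          apply congrArg
          apply List.filter_congr
          intro y _
          simp only [Function.comp, bne, ne_eq, decide_not]
          exact congrArg (! ·) (Eq.symm (Bool.beq_eq_decide_eq y.1 k))
        rw [hmf]
        apply List.map_congr_left
        intro k' hk'
        have hne : k' ≠ k := by
          have h0 := (PySem.List.mem_dedup _ _).1 hk'
          obtain ⟨p, hp, rfl⟩ := List.mem_map.1 h0
          have := (List.mem_filter.1 hp).2
          simpa using this
        have h1 : ((k, first) :: rest).filter (fun p => p.1 == k') = rest.filter (fun p => p.1 == k') := by
          simp [hne.symm]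
        rw [h1]
        congr 1
        rw [List.filter_filter]
        congr 1
        apply List.filter_congr
        intro p _
        by_cases hp : p.1 = k'
        · simp [hp, hne]
        · simp [hp]

-- ===== VERDICT (by name: the statement is the Claim_ definition above) =====
theorem group_clz_rows_by_series_py_spec : Claim_equal_group_clz_rows_by_series_py := by
  intro rows _
  unfold Spec_group_clz_rows_by_series_py group_clz_rows_by_series_py group_clz_rows_by_series_py_alt
  rw [foldA_eq_foldl_keyed, pvGo_eq_dedup_map]
  rw [PySem.Dict.items_eq_map_keys _
    (PySem.Dict.nodup_keys_foldl_modify_key _ Prod.fst [] (fun _ p => (fun x => x ++ [p.2])) _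
      (by simp [PySem.Dict.keys_empty])) []]
  rw [PySem.Dict.keys_foldl_modify_key _ Prod.fst [] (fun _ p => (fun x => x ++ [p.2]))]
  simp [PySem.Dict.getD_foldl_modify_append, PySem.Dict.keys_empty, PySem.Set.update_nil_left,
    PySem.List.dedup_eq_ofList]
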